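-- pv_equiv track=rewrite | github.com/mstockl9/ayed1-2025-tps | TP3/tp3ej2_matrizpatrones.py | escalonado_proced
-- ===== SOURCE A (Python) =====
-- from typing import List
--
-- def escalonado_proced(n: int) -> List[List[int]]:
--     """
--     Genera una matriz de N x N con un patrón que consiste en números desde el 1 hasta Nx2 separados por ceros
--     entre las filas de la matriz.
--
--     Pre: N debe ser un entero positivo.
--     Post: Retorna la matriz de N x N con el patrón descrito previamente.
--     """
--     matriz = [[] for fila in range(n)]
--     nro = 1
--
--     for i, fila in enumerate(matriz):
--         for x in range(n):
--             if x <= i: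
--                 fila.append(nro)
--                 nro += 1
--             else:
--                 fila.append(0)
--         fila.reverse()
--
--     return matriz
-- ===== SOURCE B (Python) =====
-- from typing import List
--
-- def escalonado_proced(n: int) -> List[List[int]]:
--     """Row i has n-i-1 leading zeros followed by the descending run of i+1
--     consecutive integers starting after the triangular offset i*(i+1)//2."""
--     result = []
--     for i in range(n):
--         off = 1 + i * (i + 1) // 2
--         result.append([0] * (n - i - 1) + list(range(off + i, off - 1, -1)))
--     return result
-- ===== Notes on version B (the rewrite author's own statement) =====
-- stated objective: alternative
-- what changed: B builds each row independently from the closed-form triangular offset 1 + i*(i+1)//2 as n-i-1 zeros plus a descending range, instead of A's cross-row running counter with a per-cell branch, append and in-place reverse.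
import Mathlib
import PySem

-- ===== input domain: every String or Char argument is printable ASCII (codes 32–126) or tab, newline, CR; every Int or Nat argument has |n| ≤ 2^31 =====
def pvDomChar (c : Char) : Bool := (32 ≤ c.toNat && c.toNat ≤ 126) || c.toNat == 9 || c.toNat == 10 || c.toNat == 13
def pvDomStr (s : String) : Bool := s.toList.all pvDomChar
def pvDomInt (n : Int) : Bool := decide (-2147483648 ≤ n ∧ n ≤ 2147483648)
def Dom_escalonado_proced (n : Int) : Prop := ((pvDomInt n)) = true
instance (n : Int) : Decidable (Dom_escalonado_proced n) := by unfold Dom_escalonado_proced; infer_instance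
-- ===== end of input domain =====

-- B builds each row directly from the closed-form triangular offset instead of A's
-- cross-row running counter with per-cell branching and an in-place reverse (alternative decomposition).


-- ===== PORT A =====
-- inner loop body: 'if x <= i: fila.append(nro); nro += 1 else: fila.append(0)'
def pvInnerStep (i : Int) (fs : List Int × Int) (x : Int) : List Int × Int :=
  if x ≤ i then (fs.1 ++ [fs.2], fs.2 + 1) else (fs.1 ++ [0], fs.2)

def escalonado_proced (n : Int) : List (List Int) :=
  ((PySem.List.pyRange 0 n 1).foldl
    (fun (st : List (List Int) × Int) i =>
      let inner := (PySem.List.pyRange 0 n 1).foldl (pvInnerStep i) ([], st.2)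
      (st.1 ++ [inner.1.reverse], inner.2))
    ([], 1)).1

-- ===== PORT B =====
-- row i: '[0]*(n-i-1) + list(range(off+i, off-1, -1))' with off = 1 + i*(i+1)//2
def pvRowB (n i : Int) : List Int :=
  List.replicate ((n - i - 1).toNat) 0 ++
    PySem.List.pyRange ((1 + PySem.Int.floordiv (i * (i + 1)) 2) + i)
      ((1 + PySem.Int.floordiv (i * (i + 1)) 2) - 1) (-1)

def escalonado_proced_alt (n : Int) : List (List Int) :=
  (PySem.List.pyRange 0 n 1).map (pvRowB n)

-- ===== PRECONDITION & SPEC =====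
def Spec_escalonado_proced (n : Int) (out : List (List Int)) : Prop := out = escalonado_proced_alt n
instance (n : Int) (out : List (List Int)) : Decidable (Spec_escalonado_proced n out) := by unfold Spec_escalonado_proced; infer_instance

-- ===== CLAIM (what is proved, stated in full; the proofs are below) =====
def Claim_equal_escalonado_proced : Prop := ∀ (n : Int), Dom_escalonado_proced n → Spec_escalonado_proced n (escalonado_proced n)

-- ===== LEMMAS AND PROOFS =====

-- counting phase of the inner loop: while x ≤ i, consecutive numbers are appended
theorem pv_inner_count (i : Int) : ∀ (m : Nat), (m : Int) ≤ i + 1 →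
    ∀ (acc : List Int) (nro : Int),
    (PySem.List.pyRange 0 (m : Int) 1).foldl (pvInnerStep i) (acc, nro) =
      (acc ++ PySem.List.pyRange nro (nro + m) 1, nro + m) := by
  intro m
  induction m with
  | zero =>
    intro _ acc nro
    simp [PySem.List.pyRange_one_eq_nil (le_refl 0), PySem.List.pyRange_one_eq_nil (le_refl nro)]
  | succ m ih =>
    intro hm acc nro
    have h0 : (0 : Int) ≤ (m : Int) := by positivity
    have hsplit : PySem.List.pyRange 0 ((m : Int) + 1) 1 =
        PySem.List.pyRange 0 (m : Int) 1 ++ [(m : Int)] :=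
      PySem.List.pyRange_one_succ_right h0
    have hm' : (m : Int) ≤ i + 1 := by push_cast at hm ⊢; omega
    have hmi : (m : Int) ≤ i := by push_cast at hm; omega
    push_cast
    rw [hsplit, List.foldl_append, ih hm' acc nro]
    simp only [List.foldl_cons, List.foldl_nil, pvInnerStep, if_pos hmi]
    rw [show nro + ((m : Int) + 1) = (nro + (m : Int)) + 1 by ring,
        PySem.List.pyRange_one_succ_right (by omega : nro ≤ nro + (m : Int))]
    simp [List.append_assoc]

-- zero phase of the inner loop: once every x exceeds i, only zeros are appended
theorem pv_inner_zeros (i : Int) : ∀ (l : List Int), (∀ x ∈ l, i < x) →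
    ∀ (acc : List Int) (nro : Int),
    l.foldl (pvInnerStep i) (acc, nro) = (acc ++ List.replicate l.length 0, nro) := by
  intro l
  induction l with
  | nil => intro _ acc nro; simp
  | cons x xs ih =>
    intro hl acc nro
    have hx : i < x := hl x (by simp)
    simp only [List.foldl_cons, pvInnerStep, if_neg (by omega : ¬ x ≤ i)]
    rw [ih (fun y hy => hl y (by simp [hy])) (acc ++ [0]) nro]
    simp [List.replicate_succ]

-- the whole inner loop for row i (0 ≤ i < n), starting at counter nro
theorem pv_inner (n i nro : Int) (hi0 : 0 ≤ i) (hin : i < n) :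
    (PySem.List.pyRange 0 n 1).foldl (pvInnerStep i) ([], nro) =
      (PySem.List.pyRange nro (nro + i + 1) 1 ++ List.replicate ((n - i - 1).toNat) 0,
       nro + i + 1) := by
  rw [PySem.List.pyRange_one_append 0 (i + 1) n (by omega) (by omega), List.foldl_append]
  have hcast : ((i + 1).toNat : Int) = i + 1 := by omega
  have h1 := pv_inner_count i (i + 1).toNat (by omega) [] nro
  rw [hcast] at h1
  rw [h1]
  have h2 := pv_inner_zeros i (PySem.List.pyRange (i + 1) n 1)
    (fun x hx => by have := (PySem.List.mem_pyRange_one.mp hx).1; omega)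
    (PySem.List.pyRange nro (nro + (i + 1)) 1) (nro + (i + 1))
  rw [PySem.List.length_pyRange_one] at h2
  rw [List.nil_append, h2, show nro + (i + 1) = nro + i + 1 by ring]
  congr 3
  omega

-- triangular-number step: (i+1)*(i+2)//2 = i*(i+1)//2 + (i+1)
theorem pv_tri_step (i : Int) :
    PySem.Int.floordiv ((i + 1) * (i + 2)) 2 = PySem.Int.floordiv (i * (i + 1)) 2 + (i + 1) := by
  rw [PySem.Int.floordiv_eq_ediv_of_pos (by norm_num), PySem.Int.floordiv_eq_ediv_of_pos (by norm_num)]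
  have h : (i + 1) * (i + 2) = i * (i + 1) + (i + 1) * 2 := by ring
  rw [h, Int.add_mul_ediv_right _ _ (by norm_num)]

-- outer-loop invariant: after m rows the matrix is B's first m rows and the counter is 1 + T(m)
theorem pv_outer (n : Int) : ∀ (m : Nat), (m : Int) ≤ n →
    (PySem.List.pyRange 0 (m : Int) 1).foldl
      (fun (st : List (List Int) × Int) i =>
        let inner := (PySem.List.pyRange 0 n 1).foldl (pvInnerStep i) ([], st.2)
        (st.1 ++ [inner.1.reverse], inner.2))
      ([], 1) =
    ((PySem.List.pyRange 0 (m : Int) 1).map (pvRowB n),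
      1 + PySem.Int.floordiv ((m : Int) * ((m : Int) + 1)) 2) := by
  intro m
  induction m with
  | zero =>
    intro _
    simp [PySem.List.pyRange_one_eq_nil (le_refl 0), PySem.Int.floordiv]
  | succ m ih =>
    intro hm
    have h0 : (0 : Int) ≤ (m : Int) := by positivity
    have hsplit : PySem.List.pyRange 0 ((m : Int) + 1) 1 =
        PySem.List.pyRange 0 (m : Int) 1 ++ [(m : Int)] :=
      PySem.List.pyRange_one_succ_right h0
    have hmn : (m : Int) < n := by push_cast at hm; omega
    push_cast
    rw [hsplit, List.foldl_append, ih (by omega), List.map_append, List.foldl_cons, List.foldl_nil]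
    simp only [pv_inner n (m : Int) _ h0 hmn]
    set T := PySem.Int.floordiv ((m : Int) * ((m : Int) + 1)) 2 with hT
    simp only [Prod.mk.injEq, List.map_cons, List.map_nil]
    constructor
    · congr 1
      rw [List.reverse_append, List.reverse_replicate]
      unfold pvRowB
      congr 1
      rw [← hT, PySem.List.pyRange_neg_one_eq_reverse,
          show (1 : Int) + T - 1 + 1 = 1 + T by ring]
    · have h := pv_tri_step (m : Int)
      rw [← hT] at h
      rw [show ((m : Int) + 1) * ((m : Int) + 1 + 1) = ((m : Int) + 1) * ((m : Int) + 2) by ring, h]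
      ring

-- ===== VERDICT (by name: the statement is the Claim_ definition above) =====
theorem escalonado_proced_spec : Claim_equal_escalonado_proced := by
  intro n _
  unfold Spec_escalonado_proced escalonado_proced escalonado_proced_alt
  by_cases hn : 0 ≤ n
  · have hcast : ((n.toNat : Int)) = n := Int.toNat_of_nonneg hn
    have h := pv_outer n n.toNat (by omega)
    rw [hcast] at h
    rw [h]
  · rw [PySem.List.pyRange_one_eq_nil (by omega : n ≤ 0)]
    simp
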